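-- pv_equiv track=rewrite | github.com/Flylowguy/ProjectIntellivision | Assembler/assembler.py | binaryChange
-- ===== SOURCE A (Python) =====
-- def binaryChange(number,leng):
--     number = int(number)
--     ret = ''
--     nuStr = ''
--     if(number >=0):
--         nuStr = '{0:0'+str(leng)+'b}'
--         ret = nuStr.format(number)
--         return ret
--     else:
--         number = -1*number
--         nuStr = str(bin(number))
--         nuStr = nuStr[2:]
--         nuStr = '0' *(leng-len(nuStr)) + nuStr
--         negStr = ''
--         for i in nuStr:
--             if(i == '0'):
--                 negStr += '1'
--             else:
--                 negStr += '0'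
--         negStr = bin(int(negStr,2)+1)
--         return str(negStr)[2:]
-- ===== SOURCE B (Python) =====
-- def binaryChange(number, leng):
--     number = int(number)
--     if number >= 0:
--         return ('{0:0' + str(leng) + 'b}').format(number)
--     w = max(leng, (-number).bit_length())
--     return bin(2 ** w + number)[2:]
-- ===== Notes on version B (the rewrite author's own statement) =====
-- stated objective: simpler
-- what changed: The negative branch's pad-then-flip-each-character loop plus int(...,2)+1 is replaced by the closed-form two's complement bin(2**w + number)[2:] with w = max(leng, bit_length); the non-negative format branch is kept verbatim.
import Mathlib
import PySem

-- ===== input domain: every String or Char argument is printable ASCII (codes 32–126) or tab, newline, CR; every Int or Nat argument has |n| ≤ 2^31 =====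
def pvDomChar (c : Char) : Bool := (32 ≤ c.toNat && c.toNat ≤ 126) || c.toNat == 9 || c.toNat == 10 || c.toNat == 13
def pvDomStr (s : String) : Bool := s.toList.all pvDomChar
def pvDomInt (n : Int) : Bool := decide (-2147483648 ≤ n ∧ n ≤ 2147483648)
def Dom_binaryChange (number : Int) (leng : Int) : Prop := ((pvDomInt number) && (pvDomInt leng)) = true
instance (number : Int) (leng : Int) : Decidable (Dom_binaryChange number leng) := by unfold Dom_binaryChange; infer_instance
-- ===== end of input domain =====

-- B replaces A's pad-then-flip-each-bit loop plus "+1" in the negative branch by the closed-form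
-- two's complement bin(2**w + number)[2:] with w = max(leng, bit_length); objective: simpler.

-- ===== shared helpers (both Pythons call bin() / the same format expression) =====

-- binary digit characters of n, most significant first; [] for n = 0 (the digits after '0b' in Python's bin, for n ≥ 1)
def pvBits : Nat → List Char
  | 0 => []
  | n + 1 => pvBits ((n + 1) / 2) ++ [if (n + 1) % 2 = 1 then '1' else '0']
decreasing_by exact Nat.div_lt_self (Nat.succ_pos n) (by norm_num)

-- Python bin(m) for m ≥ 0 (our only uses have m ≥ 0; sign handling omitted)
def pvBin (m : Int) : List Char :=
  '0' :: 'b' :: (if m.toNat = 0 then ['0'] else pvBits m.toNat)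

-- '{0:0<leng>b}'.format(n) for n ≥ 0, leng ≥ 0: binary digits of n zero-padded on the left to width leng
-- (for leng < 0 Python raises ValueError; those inputs are outside Pre_binaryChange)
def pvFormatBin (leng : Int) (n : Nat) : String :=
  let s := if n = 0 then ['0'] else pvBits n
  String.mk (List.replicate (leng.toNat - s.length) '0' ++ s)

-- ===== PORT A =====
def binaryChange (number : Int) (leng : Int) : String :=
  if number ≥ 0 then
    -- nuStr = '{0:0'+str(leng)+'b}'; ret = nuStr.format(number)
    pvFormatBin leng number.toNat
  else
    -- number = -1*number
    let n : Nat := (-number).toNat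
    -- nuStr = str(bin(number))[2:]
    let nuStr : List Char := (pvBin (n : Int)).drop 2
    -- nuStr = '0' * (leng - len(nuStr)) + nuStr
    let padded : List Char := List.replicate (leng - nuStr.length).toNat '0' ++ nuStr
    -- negStr = ''; for i in nuStr: negStr += '1' if i == '0' else '0'
    let negStr : List Char := padded.foldl (fun acc c => acc ++ [if c = '0' then '1' else '0']) []
    -- int(negStr, 2)  (negStr consists of '0'/'1' only)
    let v : Int := negStr.foldl (fun acc c => 2 * acc + (if c = '1' then 1 else 0)) 0
    -- return str(bin(int(negStr,2)+1))[2:]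
    String.mk ((pvBin (v + 1)).drop 2)

-- ===== PORT B =====
-- Python int.bit_length() = number of binary digits
def pvBitLength (n : Nat) : Nat := (pvBits n).length

def binaryChange_alt (number : Int) (leng : Int) : String :=
  if number ≥ 0 then
    pvFormatBin leng number.toNat
  else
    -- w = max(leng, (-number).bit_length())
    let w : Int := max leng (pvBitLength (-number).toNat : Int)
    -- return bin(2 ** w + number)[2:]   (w ≥ 1 here, so 2**w is 2^w.toNat)
    String.mk ((pvBin ((2 : Int) ^ w.toNat + number)).drop 2)

-- ===== PRECONDITION & SPEC =====
-- Pre_ excludes exactly the inputs where A raises ValueError (negative width in the format spec,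
-- reached only on number ≥ 0); B's format call raises there too.
def Pre_binaryChange (number : Int) (leng : Int) : Prop := number < 0 ∨ 0 ≤ leng
instance (number : Int) (leng : Int) : Decidable (Pre_binaryChange number leng) := by
  unfold Pre_binaryChange; infer_instance

def pvWitness_binaryChange : Int × Int := (-5, 8)

def Spec_binaryChange (number : Int) (leng : Int) (out : String) : Prop := out = binaryChange_alt number leng
instance (number : Int) (leng : Int) (out : String) : Decidable (Spec_binaryChange number leng out) := by unfold Spec_binaryChange; infer_instance

-- ===== CLAIM (what is proved, stated in full; the proofs are below) =====
def Claim_equal_binaryChange : Prop := ∀ (number : Int) (leng : Int), Dom_binaryChange number leng → Pre_binaryChange number leng → Spec_binaryChange number leng (binaryChange number leng)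

-- ===== LEMMAS AND PROOFS =====

-- the flip loop is map
theorem pvFoldl_flip_eq_map (s acc : List Char) :
    s.foldl (fun acc c => acc ++ [if c = '0' then '1' else '0']) acc
      = acc ++ s.map (fun c => if c = '0' then '1' else '0') := by
  induction s generalizing acc with
  | nil => simp
  | cons c s ih => simp [List.foldl, ih, List.append_assoc]

def pvParse (s : List Char) : Int :=
  s.foldl (fun acc c => 2 * acc + (if c = '1' then 1 else 0)) 0

theorem pvParseAux_acc (s : List Char) (a : Int) :
    s.foldl (fun acc c => 2 * acc + (if c = '1' then 1 else 0)) a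
      = 2 ^ s.length * a + pvParse s := by
  induction s generalizing a with
  | nil => simp [pvParse]
  | cons c s ih =>
    simp only [List.foldl, pvParse, pow_succ, List.length_cons]
    rw [ih, ih (2 * 0 + _)]
    ring

theorem pvParse_append (s t : List Char) :
    pvParse (s ++ t) = 2 ^ t.length * pvParse s + pvParse t := by
  unfold pvParse
  rw [List.foldl_append, pvParseAux_acc]
  rfl

theorem pvParse_bits (n : Nat) : pvParse (pvBits n) = n := by
  induction n using Nat.strong_induction_on with
  | _ n ih =>
    match n with
    | 0 => simp [pvBits, pvParse]
    | n + 1 =>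
      rw [pvBits, pvParse_append, ih ((n + 1) / 2) (Nat.div_lt_self (Nat.succ_pos n) (by norm_num))]
      have h := Nat.div_add_mod (n + 1) 2
      have hm : (n + 1) % 2 = 1 ∨ (n + 1) % 2 = 0 := by omega
      rcases hm with hm | hm <;> simp [pvParse, hm] <;> omega

theorem pvParse_replicate_zero (k : Nat) (t : List Char) :
    pvParse (List.replicate k '0' ++ t) = pvParse t := by
  rw [pvParse_append]
  have : pvParse (List.replicate k '0') = 0 := by
    induction k with
    | zero => rfl
    | succ k ih =>
      rw [List.replicate_succ']
      rw [pvParse_append, ih]; rfl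
  rw [this]; ring

def pvAllBin (s : List Char) : Prop := ∀ c ∈ s, c = '0' ∨ c = '1'

theorem pvAllBin_bits (n : Nat) : pvAllBin (pvBits n) := by
  induction n using Nat.strong_induction_on with
  | _ n ih =>
    match n with
    | 0 => intro c hc; simp [pvBits] at hc
    | n + 1 =>
      intro c hc
      rw [pvBits] at hc
      rcases List.mem_append.mp hc with h | h
      · exact ih ((n + 1) / 2) (Nat.div_lt_self (Nat.succ_pos n) (by norm_num)) c h
      · simp at h; split_ifs at h <;> simp [h]

theorem pvParse_flip (s : List Char) (hs : pvAllBin s) :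
    pvParse (s.map (fun c => if c = '0' then '1' else '0')) = 2 ^ s.length - 1 - pvParse s := by
  induction s with
  | nil => simp [pvParse]
  | cons c s ih =>
    have hc := hs c (List.mem_cons_self ..)
    have hs' : pvAllBin s := fun x hx => hs x (List.mem_cons_of_mem _ hx)
    have hcons : ∀ (d : Char) (t : List Char), pvParse (d :: t)
        = 2 ^ t.length * (if d = '1' then 1 else 0) + pvParse t := by
      intro d t
      show t.foldl _ (2 * 0 + _) = _
      rw [pvParseAux_acc]; ring_nf
    rw [List.map_cons, hcons, hcons, ih hs']
    rcases hc with h | h <;> simp [h, pow_succ] <;> ring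

theorem pvBits_succ_ne_nil (n : Nat) : pvBits (n + 1) ≠ [] := by
  rw [pvBits]; simp

-- pad length: |replicate (leng - L).toNat '0' ++ s| = (max leng L).toNat when L = |s| ≥ 1
theorem pvPad_length (leng : Int) (L : Nat) (hL : 1 ≤ L) :
    (leng - (L : Int)).toNat + L = (max leng (L : Int)).toNat := by
  omega

-- ===== VERDICT (by name: the statement is the Claim_ definition above) =====
theorem binaryChange_spec : Claim_equal_binaryChange := by
  intro number leng _ _
  unfold Spec_binaryChange binaryChange binaryChange_alt
  split_ifs with h
  · rfl
  · -- negative branch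
    set n : Nat := (-number).toNat with hn
    have hn1 : 1 ≤ n := by omega
    obtain ⟨m, hm⟩ : ∃ m, n = m + 1 := ⟨n - 1, by omega⟩
    have hInt : ((n : Int)).toNat = n := rfl
    -- nuStr = bits n
    have hdrop : (pvBin (n : Int)).drop 2 = pvBits n := by
      rw [pvBin, hInt, if_neg (by omega)]
      rfl
    simp only [hdrop]
    set L : Nat := (pvBits n).length with hLdef
    have hLpos : 1 ≤ L := by
      rw [hLdef, hm]
      exact List.length_pos_of_ne_nil (pvBits_succ_ne_nil m)
    set padded : List Char := List.replicate (leng - (L : Int)).toNat '0' ++ pvBits n with hpad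
    have hpadlen : padded.length = (max leng (L : Int)).toNat := by
      rw [hpad, List.length_append, List.length_replicate, ← hLdef]
      exact pvPad_length leng L hLpos
    have hpadbin : pvAllBin padded := by
      intro c hc
      rcases List.mem_append.mp hc with hc | hc
      · left; exact List.eq_of_mem_replicate hc
      · exact pvAllBin_bits n c hc
    have hpadval : pvParse padded = (n : Int) := by
      rw [hpad, pvParse_replicate_zero, pvParse_bits]
    -- value of the flip-parse-add-one pipeline
    rw [pvFoldl_flip_eq_map]
    show String.mk ((pvBin (pvParse (List.map _ padded) + 1)).drop 2) = _
    rw [pvParse_flip padded hpadbin, hpadval, hpadlen]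
    -- 2 ^ |padded| - 1 - n + 1 = 2 ^ w.toNat + number
    have hw : (max leng ((pvBitLength (-number).toNat : Nat) : Int)).toNat
        = (max leng (L : Int)).toNat := by
      simp [pvBitLength, ← hn, ← hLdef]
    have : (2 : Int) ^ (max leng (L : Int)).toNat - 1 - (n : Int) + 1
        = (2 : Int) ^ (max leng ((pvBitLength (-number).toNat : Nat) : Int)).toNat + number := by
      rw [hw]
      have : (n : Int) = -number := by omega
      omega
    rw [this]
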